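-- pv_equiv track=rewrite | github.com/viatoro/atopile | src/atopile/lsp/lsp_server.py | _find_comment_position
-- ===== SOURCE A (Python) =====
-- def _find_comment_position(line: str) -> int | None:
--     """
--     Find the position of a comment (#) in a line, ignoring # inside strings.
--     Returns None if no comment found.
--     """
--     in_string = False
--     string_char = None
--
--     for i, char in enumerate(line):
--         if char in ('"', "'") and (i == 0 or line[i - 1] != "\\"):
--             if not in_string:
--                 in_string = True
--                 string_char = char
--             elif char == string_char:
--                 in_string = False
--                 string_char = None
--         elif char == "#" and not in_string:
--             return i
--
--     return None
-- ===== SOURCE B (Python) =====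
-- def _find_comment_position(line: str) -> int | None:
--     """Index-walk with a nested string-span consumer instead of a boolean state machine."""
--     n = len(line)
--     i = 0
--     while i < n:
--         c = line[i]
--         if c == "#":
--             return i
--         if c in ('"', "'") and (i == 0 or line[i - 1] != "\\"):
--             q = c
--             i += 1
--             while i < n and not (line[i] == q and line[i - 1] != "\\"):
--                 i += 1
--             if i == n:
--                 return None
--             i += 1
--         else:
--             i += 1
--     return None
-- ===== Notes on version B (the rewrite author's own statement) =====
-- stated objective: alternative
-- what changed: Replaces the boolean in_string/string_char state machine with an index-based outer scan plus a nested inner loop that consumes each string span up to its unescaped closing quote.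
import Mathlib
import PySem

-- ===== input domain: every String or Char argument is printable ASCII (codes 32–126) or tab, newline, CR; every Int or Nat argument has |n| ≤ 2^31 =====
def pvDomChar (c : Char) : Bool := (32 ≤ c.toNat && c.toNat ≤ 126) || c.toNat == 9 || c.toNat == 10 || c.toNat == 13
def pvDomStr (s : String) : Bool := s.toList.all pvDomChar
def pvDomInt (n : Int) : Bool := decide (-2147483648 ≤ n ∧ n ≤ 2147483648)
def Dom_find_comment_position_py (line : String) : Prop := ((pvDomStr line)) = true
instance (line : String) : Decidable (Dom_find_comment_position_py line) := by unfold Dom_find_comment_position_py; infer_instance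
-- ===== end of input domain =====

-- B replaces A's in_string/string_char state machine by a nested span-consuming scan (alternative decomposition, same cost).

-- ===== PORT A =====
-- for i, char in enumerate(line) with state (in_string, string_char); line[i-1] read off the original list
def pvFindA (orig : List Char) : List Char → Nat → Bool → Option Char → Option Int
  | [], _, _, _ => none
  | c :: rest, i, instr, sc =>
    if (c = '"' ∨ c = '\'') ∧ (i = 0 ∨ ¬ orig[i-1]? = some '\\') then
      if instr = false then pvFindA orig rest (i+1) true (some c)
      else if some c = sc then pvFindA orig rest (i+1) false none
      else pvFindA orig rest (i+1) instr sc
    else if c = '#' ∧ instr = false then some (i : Int)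
    else pvFindA orig rest (i+1) instr sc

def find_comment_position_py (line : String) : Option Int :=
  pvFindA line.toList line.toList 0 false none

-- ===== PORT B =====
-- inner while loop: advance until line[i] == q and line[i-1] != '\'; returns remaining chars and index after the close
def pvSkip (orig : List Char) (q : Char) : List Char → Nat → Option (List Char × Nat)
  | [], _ => none
  | c :: rest, i =>
    if c = q ∧ ¬ orig[i-1]? = some '\\' then some (rest, i+1)
    else pvSkip orig q rest (i+1)

theorem pvSkip_length (orig : List Char) (q : Char) :
    ∀ (l : List Char) (i : Nat) (p : List Char × Nat),
      pvSkip orig q l i = some p → p.1.length < l.length := by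
  intro l
  induction l with
  | nil => intro i p h; simp [pvSkip] at h
  | cons c rest ih =>
    intro i p h
    simp only [pvSkip] at h
    split at h
    · cases h; simp
    · have := ih (i+1) p h; simp; omega

-- outer while loop of B
def pvFindB (orig : List Char) : List Char → Nat → Option Int
  | [], _ => none
  | c :: rest, i =>
    if c = '#' then some (i : Int)
    else if (c = '"' ∨ c = '\'') ∧ (i = 0 ∨ ¬ orig[i-1]? = some '\\') then
      match h : pvSkip orig c rest (i+1) with
      | none => none
      | some p => pvFindB orig p.1 p.2
    else pvFindB orig rest (i+1)
termination_by l _ => l.length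
decreasing_by
  · have := pvSkip_length orig c rest (i+1) p h; simp; omega
  · simp

def find_comment_position_py_alt (line : String) : Option Int :=
  pvFindB line.toList line.toList 0

-- ===== PRECONDITION & SPEC =====
def Spec_find_comment_position_py (line : String) (out : Option Int) : Prop := out = find_comment_position_py_alt line
instance (line : String) (out : Option Int) : Decidable (Spec_find_comment_position_py line out) := by unfold Spec_find_comment_position_py; infer_instance

-- ===== CLAIM (what is proved, stated in full; the proofs are below) =====
def Claim_equal_find_comment_position_py : Prop := ∀ (line : String), Dom_find_comment_position_py line → Spec_find_comment_position_py line (find_comment_position_py line)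

-- ===== LEMMAS AND PROOFS =====

-- While A is inside a string opened with quote q, it scans exactly until pvSkip's unescaped close.
theorem pvFindA_in_string (orig : List Char) (q : Char) (hq : q = '"' ∨ q = '\'') :
    ∀ (l : List Char) (i : Nat), 0 < i →
      pvFindA orig l i true (some q) =
        (match pvSkip orig q l i with
         | none => none
         | some p => pvFindA orig p.1 p.2 false none) := by
  intro l
  induction l with
  | nil => intro i _; simp [pvFindA, pvSkip]
  | cons c rest ih =>
    intro i hi
    by_cases hcq : c = q
    · subst hcq
      by_cases hesc : orig[i-1]? = some '\\'
      · have hA : ¬ ((c = '"' ∨ c = '\'') ∧ (i = 0 ∨ ¬ orig[i-1]? = some '\\')) := by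
          rintro ⟨_, h2⟩
          rcases h2 with h2 | h2
          · omega
          · exact h2 hesc
        have hcnum : c ≠ '#' := by rcases hq with h | h <;> simp [h]
        rw [pvFindA, if_neg hA, if_neg (by simp [hcnum])]
        rw [ih (i+1) (by omega)]
        have hsk : pvSkip orig c (c :: rest) i = pvSkip orig c rest (i+1) := by
          rw [pvSkip, if_neg (by rintro ⟨_, h2⟩; exact h2 hesc)]
        rw [hsk]
      · have hA : (c = '"' ∨ c = '\'') ∧ (i = 0 ∨ ¬ orig[i-1]? = some '\\') := ⟨hq, Or.inr hesc⟩
        rw [pvFindA, if_pos hA, if_neg (by simp), if_pos rfl]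
        rw [pvSkip, if_pos ⟨rfl, hesc⟩]
    · have hsk : pvSkip orig q (c :: rest) i = pvSkip orig q rest (i+1) := by
        rw [pvSkip, if_neg (by rintro ⟨h, _⟩; exact hcq h)]
      rw [hsk, ← ih (i+1) (by omega)]
      by_cases hA : (c = '"' ∨ c = '\'') ∧ (i = 0 ∨ ¬ orig[i-1]? = some '\\')
      · rw [pvFindA, if_pos hA, if_neg (by simp), if_neg (by simp [hcq])]
      · rw [pvFindA, if_neg hA, if_neg (by rintro ⟨_, h⟩; cases h)]

theorem pvFind_equiv (orig : List Char) :
    ∀ (n : Nat) (l : List Char), l.length ≤ n → ∀ (i : Nat),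
      pvFindA orig l i false none = pvFindB orig l i := by
  intro n
  induction n with
  | zero =>
    intro l hl i
    have : l = [] := List.eq_nil_of_length_eq_zero (by omega)
    subst this; simp [pvFindA, pvFindB]
  | succ n ih =>
    intro l hl i
    cases l with
    | nil => simp [pvFindA, pvFindB]
    | cons c rest =>
      have hrest : rest.length ≤ n := by simp at hl; omega
      by_cases hA : (c = '"' ∨ c = '\'') ∧ (i = 0 ∨ ¬ orig[i-1]? = some '\\')
      · have hcnum : c ≠ '#' := by rcases hA.1 with h | h <;> simp [h]
        rw [pvFindA, if_pos hA, if_pos rfl]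
        rw [pvFindA_in_string orig c hA.1 rest (i+1) (by omega)]
        rw [pvFindB, if_neg hcnum, if_pos hA]
        cases hsk : pvSkip orig c rest (i+1) with
        | none => simp
        | some p =>
          have hlen := pvSkip_length orig c rest (i+1) p hsk
          simp only
          exact ih p.1 (by omega) p.2
      · by_cases hc : c = '#'
        · subst hc
          rw [pvFindA, if_neg hA, if_pos ⟨rfl, rfl⟩, pvFindB, if_pos rfl]
        · rw [pvFindA, if_neg hA, if_neg (by rintro ⟨h, _⟩; exact hc h)]
          rw [pvFindB, if_neg hc, if_neg hA]
          exact ih rest hrest (i+1)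

-- ===== VERDICT (by name: the statement is the Claim_ definition above) =====
theorem find_comment_position_py_spec : Claim_equal_find_comment_position_py := by
  intro line _
  unfold Spec_find_comment_position_py find_comment_position_py find_comment_position_py_alt
  exact pvFind_equiv line.toList line.toList.length line.toList le_rfl 0
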